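-- pv_equiv track=rewrite | github.com/dalejlee/TimelyTiger | timeAlg.py | createCutoffs
-- ===== SOURCE A (Python) =====
-- def createCutoffs(avs, start, end):
--     set = {start, end}
--     for x in avs:
--         for range in x:
--             set.add(range[0])
--             set.add(range[1])
--     cutoffs = list()
--     for item in set:
--         cutoffs.append(item)
--     cutoffs.sort()
--     return cutoffs
-- ===== SOURCE B (Python) =====
-- def createCutoffs(avs, start, end):
--     out = []
--     _insert_sorted(out, start)
--     _insert_sorted(out, end)
--     for x in avs:
--         for r in x:
--             _insert_sorted(out, r[0])
--             _insert_sorted(out, r[1])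
--     return out
--
-- def _insert_sorted(out, v):
--     # keep `out` strictly increasing: find v's position, insert unless present
--     i = 0
--     while i < len(out) and out[i] < v:
--         i += 1
--     if i == len(out) or out[i] != v:
--         out.insert(i, v)
-- ===== Notes on version B (the rewrite author's own statement) =====
-- stated objective: alternative
-- what changed: Replaces hash-set collection followed by a final sort with an online insertion algorithm that maintains a strictly increasing list throughout, scanning for each endpoint's position and inserting it there unless already present (no set, no sort call).
import Mathlib
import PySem

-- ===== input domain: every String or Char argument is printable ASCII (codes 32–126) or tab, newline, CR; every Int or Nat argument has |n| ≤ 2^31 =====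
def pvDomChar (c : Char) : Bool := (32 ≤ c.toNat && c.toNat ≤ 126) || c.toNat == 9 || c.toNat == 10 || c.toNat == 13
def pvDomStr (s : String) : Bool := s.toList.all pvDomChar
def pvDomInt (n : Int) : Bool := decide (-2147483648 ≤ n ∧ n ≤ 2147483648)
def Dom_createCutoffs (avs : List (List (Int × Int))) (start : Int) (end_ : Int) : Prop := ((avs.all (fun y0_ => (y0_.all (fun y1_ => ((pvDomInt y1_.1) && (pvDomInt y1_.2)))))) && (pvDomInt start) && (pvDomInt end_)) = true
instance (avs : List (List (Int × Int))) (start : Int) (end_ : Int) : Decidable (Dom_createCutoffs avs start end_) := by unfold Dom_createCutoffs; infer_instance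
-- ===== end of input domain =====

-- B replaces hash-set collection + final sort by online sorted insertion: it maintains a
-- strictly increasing list, inserting each endpoint at its scanned position unless present
-- (alternative algorithm, no speed claim).

-- ===== PORT A =====
-- set = {start, end}; nested loops of set.add; copy to list; sort
def createCutoffs (avs : List (List (Int × Int))) (start : Int) (end_ : Int) : List Int :=
  PySem.List.sorted
    ((avs.foldl (fun s x => x.foldl (fun s r => PySem.Set.add (PySem.Set.add s r.1) r.2) s)
        (PySem.Set.add (PySem.Set.add PySem.Set.empty start) end_)).foldl
      (fun acc item => acc ++ [item]) [])
    (fun x => x) false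

-- ===== PORT B =====
-- `while i < len(out) and out[i] < v: i += 1` (scan the suffix from position i)
def pvScanAux (v : Int) : List Int → Nat → Nat
  | [], i => i
  | h :: t, i => if h < v then pvScanAux v t (i + 1) else i

-- `if i == len(out) or out[i] != v: out.insert(i, v)`
def pvInsertOne (out : List Int) (v : Int) : List Int :=
  let i := pvScanAux v out 0
  if h : i < out.length then
    if out[i] = v then out else out.insertIdx i v
  else out ++ [v]

def createCutoffs_alt (avs : List (List (Int × Int))) (start : Int) (end_ : Int) : List Int :=
  avs.foldl (fun out x => x.foldl (fun out r => pvInsertOne (pvInsertOne out r.1) r.2) out)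
    (pvInsertOne (pvInsertOne [] start) end_)

-- ===== PRECONDITION & SPEC =====
def Spec_createCutoffs (avs : List (List (Int × Int))) (start : Int) (end_ : Int) (out : List Int) : Prop := out = createCutoffs_alt avs start end_
instance (avs : List (List (Int × Int))) (start : Int) (end_ : Int) (out : List Int) : Decidable (Spec_createCutoffs avs start end_ out) := by unfold Spec_createCutoffs; infer_instance

-- ===== CLAIM =====
def Claim_equal_createCutoffs : Prop := ∀ (avs : List (List (Int × Int))) (start : Int) (end_ : Int), Dom_createCutoffs avs start end_ → Spec_createCutoffs avs start end_ (createCutoffs avs start end_)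

-- ===== LEMMAS AND PROOFS =====

-- flat multiset of endpoints
def pvFlat (avs : List (List (Int × Int))) : List Int :=
  avs.flatMap (fun x => x.flatMap (fun r => [r.1, r.2]))

-- structural form of one insertion, used only by the proofs
def insRec : List Int → Int → List Int
  | [], v => [v]
  | h :: t, v => if v < h then v :: h :: t else if v = h then h :: t else h :: insRec t v

theorem pvScanAux_shift (v : Int) (t : List Int) (i : Nat) :
    pvScanAux v t (i + 1) = pvScanAux v t i + 1 := by
  induction t generalizing i with
  | nil => rfl
  | cons h t ih =>
    unfold pvScanAux
    by_cases hlt : h < v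
    · rw [if_pos hlt, if_pos hlt, ih]
    · rw [if_neg hlt, if_neg hlt]

theorem pvInsertOne_eq_insRec (out : List Int) (v : Int) :
    pvInsertOne out v = insRec out v := by
  induction out with
  | nil => rfl
  | cons h t ih =>
    unfold pvInsertOne insRec pvScanAux
    by_cases hlt : h < v
    · rw [if_pos hlt, pvScanAux_shift]
      rw [if_neg (by omega), if_neg (by omega)]
      set j := pvScanAux v t 0 with hj
      unfold pvInsertOne at ih
      rw [← hj] at ih
      by_cases hjl : j < t.length
      · rw [dif_pos (by simp; omega)]
        have hget : (h :: t)[j + 1]'(by simp; omega) = t[j] := by simp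
        rw [hget, List.insertIdx_succ_cons]
        rw [dif_pos hjl] at ih
        by_cases he : t[j] = v
        · rw [if_pos he]; rw [if_pos he] at ih; rw [← ih]
        · rw [if_neg he]; rw [if_neg he] at ih; rw [← ih]
      · rw [dif_neg (by simp; omega)]
        rw [dif_neg hjl] at ih
        rw [← ih]; simp
    · rw [if_neg hlt, dif_pos (by simp)]
      simp only [List.getElem_cons_zero]
      by_cases he : h = v
      · rw [if_pos he, if_neg (by omega), if_pos he.symm]
      · rw [if_neg he, if_pos (by omega)]
        simp [List.insertIdx]

theorem mem_insRec (out : List Int) (v x : Int) :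
    x ∈ insRec out v ↔ x = v ∨ x ∈ out := by
  induction out with
  | nil => simp [insRec]
  | cons h t ih =>
    unfold insRec
    split_ifs with h1 h2
    · simp
    · subst h2; simp
    · simp [ih]; tauto

theorem pairwise_insRec (out : List Int) (v : Int) (hp : out.Pairwise (· < ·)) :
    (insRec out v).Pairwise (· < ·) := by
  induction out with
  | nil => simp [insRec]
  | cons h t ih =>
    rcases List.pairwise_cons.mp hp with ⟨hh, ht⟩
    unfold insRec
    split_ifs with h1 h2
    · refine List.pairwise_cons.mpr ⟨?_, hp⟩
      intro b hb
      rcases List.mem_cons.mp hb with rfl | hb'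
      · exact h1
      · have := hh b hb'; omega
    · exact hp
    · refine List.pairwise_cons.mpr ⟨?_, ih ht⟩
      intro b hb
      rcases (mem_insRec t v b).mp hb with rfl | hb'
      · omega
      · exact hh b hb'

theorem foldl_insRec_inv (l : List Int) :
    ∀ acc : List Int, acc.Pairwise (· < ·) →
    (l.foldl insRec acc).Pairwise (· < ·) ∧
      (∀ x, x ∈ l.foldl insRec acc ↔ x ∈ acc ∨ x ∈ l) := by
  induction l with
  | nil => intro acc hacc; exact ⟨hacc, by simp⟩
  | cons v t ih =>
    intro acc hacc
    have h := ih (insRec acc v) (pairwise_insRec acc v hacc)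
    refine ⟨h.1, ?_⟩
    intro x
    rw [List.foldl_cons, h.2 x, mem_insRec]
    simp; tauto

-- A's nested add-loops are a fold of Set.add over the flat endpoint list
theorem inner_add_eq (x : List (Int × Int)) (s : PySem.Set Int) :
    x.foldl (fun s r => PySem.Set.add (PySem.Set.add s r.1) r.2) s
      = (x.flatMap (fun r => [r.1, r.2])).foldl PySem.Set.add s := by
  induction x generalizing s with
  | nil => rfl
  | cons r t ih => rw [List.foldl_cons, ih]; rfl

theorem outer_add_eq (avs : List (List (Int × Int))) (s : PySem.Set Int) :
    avs.foldl (fun s x => x.foldl (fun s r => PySem.Set.add (PySem.Set.add s r.1) r.2) s) s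
      = (pvFlat avs).foldl PySem.Set.add s := by
  induction avs generalizing s with
  | nil => rfl
  | cons x t ih =>
    rw [List.foldl_cons, ih, inner_add_eq]
    simp [pvFlat, List.foldl_append]

theorem foldl_copy (l acc : List Int) :
    l.foldl (fun acc item => acc ++ [item]) acc = acc ++ l := by
  induction l generalizing acc with
  | nil => simp
  | cons a t ih => simp [List.foldl, ih]

-- B's nested insert-loops are a fold of insRec over the flat endpoint list
theorem inner_ins_eq (x : List (Int × Int)) (acc : List Int) :
    x.foldl (fun out r => insRec (insRec out r.1) r.2) acc
      = (x.flatMap (fun r => [r.1, r.2])).foldl insRec acc := by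
  induction x generalizing acc with
  | nil => rfl
  | cons r t ih => rw [List.foldl_cons, ih]; rfl

theorem outer_ins_eq (avs : List (List (Int × Int))) (acc : List Int) :
    avs.foldl (fun out x => x.foldl (fun out r => insRec (insRec out r.1) r.2) out) acc
      = (pvFlat avs).foldl insRec acc := by
  induction avs generalizing acc with
  | nil => rfl
  | cons x t ih =>
    rw [List.foldl_cons, ih, inner_ins_eq]
    simp [pvFlat, List.foldl_append]

theorem createCutoffs_eq (avs : List (List (Int × Int))) (start end_ : Int) :
    createCutoffs avs start end_ = createCutoffs_alt avs start end_ := by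
  have hA : createCutoffs avs start end_
      = PySem.List.sorted (PySem.Set.ofList ([start, end_] ++ pvFlat avs)) (fun x => x) false := by
    unfold createCutoffs
    rw [outer_add_eq, foldl_copy, PySem.Set.ofList_eq_foldl]
    rfl
  have hfun : pvInsertOne = insRec := by
    funext o v; exact pvInsertOne_eq_insRec o v
  have hB : createCutoffs_alt avs start end_
      = ([start, end_] ++ pvFlat avs).foldl insRec [] := by
    unfold createCutoffs_alt
    simp only [hfun]
    rw [outer_ins_eq]
    rfl
  have hinv := foldl_insRec_inv ([start, end_] ++ pvFlat avs) [] (by simp)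
  have hnodupB : (([start, end_] ++ pvFlat avs).foldl insRec []).Nodup :=
    hinv.1.imp (fun h => by omega)
  have hnodupS : (PySem.Set.ofList ([start, end_] ++ pvFlat avs)).Nodup :=
    PySem.Set.nodup_ofList _
  have hmem : ∀ x, x ∈ ([start, end_] ++ pvFlat avs).foldl insRec []
      ↔ x ∈ PySem.Set.ofList ([start, end_] ++ pvFlat avs) := by
    intro x
    rw [hinv.2 x, PySem.Set.mem_ofList]
    simp
  have hperm : (([start, end_] ++ pvFlat avs).foldl insRec []).Perm
      (PySem.Set.ofList ([start, end_] ++ pvFlat avs)) :=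
    (List.perm_ext_iff_of_nodup hnodupB hnodupS).mpr hmem
  rw [hA, hB]
  exact PySem.List.sorted_eq_of_perm_of_pairwise_lt _ _ (fun x => x) hperm hinv.1

-- ===== VERDICT =====
theorem createCutoffs_spec : Claim_equal_createCutoffs := by
  intro avs start end_ _
  unfold Spec_createCutoffs
  exact createCutoffs_eq avs start end_
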